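-- pv_equiv track=rewrite | github.com/SviatoslavExpert/Python-for-beginners | lesson_10/additional task_1.py | is_ariphmetic
-- ===== SOURCE A (Python) =====
-- def is_same(number_list):
--     for i in range(len(number_list) - 1):
--         if number_list[i+1] != number_list[i]:
--             return False
--     return True
--
-- def is_ariphmetic(number_list):
--     temp_list = []
--     for i in range(len(number_list) - 1):
--         temp_list.append(number_list[i+1] - number_list[i])
--     if is_same(temp_list) == True:
--         return number_list[len(number_list) - 1] + temp_list[0]
--     else:
--         return None
-- ===== SOURCE B (Python) =====
-- def is_ariphmetic(number_list):
--     diff = number_list[1] - number_list[0]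
--     for i in range(1, len(number_list) - 1):
--         if number_list[i + 1] - number_list[i] != diff:
--             return None
--     return number_list[-1] + diff
-- ===== Notes on version B (the rewrite author's own statement) =====
-- stated objective: simpler
-- what changed: B drops the intermediate difference list and the is_same helper: it fixes diff = number_list[1] - number_list[0] and makes one fused pass comparing each adjacent difference to that scalar, instead of building a list of differences and then scanning it for equality.
import Mathlib
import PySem

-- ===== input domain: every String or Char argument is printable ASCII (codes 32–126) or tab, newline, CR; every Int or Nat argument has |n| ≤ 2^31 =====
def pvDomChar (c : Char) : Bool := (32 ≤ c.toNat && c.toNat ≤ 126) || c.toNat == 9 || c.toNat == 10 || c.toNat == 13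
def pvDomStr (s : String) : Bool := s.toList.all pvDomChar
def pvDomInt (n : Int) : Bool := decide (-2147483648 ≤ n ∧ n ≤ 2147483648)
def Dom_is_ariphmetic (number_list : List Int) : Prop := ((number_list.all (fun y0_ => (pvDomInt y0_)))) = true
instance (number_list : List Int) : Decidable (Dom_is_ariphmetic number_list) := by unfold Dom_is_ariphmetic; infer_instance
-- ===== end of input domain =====

-- B replaces A's build-a-difference-list-then-scan-it-with-is_same by one fused pass
-- against the scalar diff = number_list[1] - number_list[0] (objective: simpler).

-- ===== PORT A =====
-- 'for i in range(len(number_list)-1): if number_list[i+1] != number_list[i]: return False / return True'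
-- pyGetD is exact here: every index drawn from the range is in bounds.
def isSameGo (l : List Int) : List Int → Bool
  | [] => true
  | i :: rest =>
      if PySem.List.pyGetD l (i + 1) 0 ≠ PySem.List.pyGetD l i 0 then false
      else isSameGo l rest

def is_same (number_list : List Int) : Bool :=
  isSameGo number_list (PySem.List.pyRange 0 ((number_list.length : Int) - 1) 1)

-- the loop building temp_list (pyGetD exact: indices from the range are in bounds)
def tempListA (l : List Int) : List Int :=
  (PySem.List.pyRange 0 ((l.length : Int) - 1) 1).foldl
    (fun acc i => acc ++ [PySem.List.pyGetD l (i + 1) 0 - PySem.List.pyGetD l i 0]) []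

def is_ariphmetic (number_list : List Int) : Option Int :=
  let temp_list := tempListA number_list
  if is_same temp_list = true then
    -- number_list[len(number_list)-1] + temp_list[0]; none = IndexError (len < 2), excluded by Pre_
    match PySem.List.pyGet? number_list ((number_list.length : Int) - 1) with
    | some last =>
        match PySem.List.pyGet? temp_list 0 with
        | some d0 => some (last + d0)
        | none => none
    | none => none
  else none

-- ===== PORT B =====
-- the fused 'for i in range(1, len(number_list)-1)' loop; on fall-through returns number_list[-1] + diff
def altGo (l : List Int) (diff : Int) : List Int → Option Int
  | [] => some (PySem.List.pyGetD l (-1) 0 + diff)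
  | i :: rest =>
      if PySem.List.pyGetD l (i + 1) 0 - PySem.List.pyGetD l i 0 ≠ diff then none
      else altGo l diff rest

def is_ariphmetic_alt (number_list : List Int) : Option Int :=
  -- diff = number_list[1] - number_list[0]; none = IndexError (len < 2), excluded by Pre_
  match PySem.List.pyGet? number_list 1, PySem.List.pyGet? number_list 0 with
  | some a, some b =>
      altGo number_list (a - b) (PySem.List.pyRange 1 ((number_list.length : Int) - 1) 1)
  | _, _ => none

-- ===== PRECONDITION & SPEC =====
-- Both Pythons raise IndexError on lists of length < 2 (A on temp_list[0] / number_list[-1], B on number_list[1]).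
def Pre_is_ariphmetic (number_list : List Int) : Prop := 2 ≤ number_list.length
instance (number_list : List Int) : Decidable (Pre_is_ariphmetic number_list) := by
  unfold Pre_is_ariphmetic; infer_instance

def pvWitness_is_ariphmetic : List Int := [3, 5, 7]

def Spec_is_ariphmetic (number_list : List Int) (out : Option Int) : Prop := out = is_ariphmetic_alt number_list
instance (number_list : List Int) (out : Option Int) : Decidable (Spec_is_ariphmetic number_list out) := by unfold Spec_is_ariphmetic; infer_instance

-- ===== CLAIM (what is proved, stated in full; the proofs are below) =====
def Claim_equal_is_ariphmetic : Prop := ∀ (number_list : List Int), Dom_is_ariphmetic number_list → Pre_is_ariphmetic number_list → Spec_is_ariphmetic number_list (is_ariphmetic number_list)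

-- ===== LEMMAS AND PROOFS =====

-- the adjacent difference number_list[i+1] - number_list[i], the quantity both loops compare
def gfun (l : List Int) (i : Int) : Int :=
  PySem.List.pyGetD l (i + 1) 0 - PySem.List.pyGetD l i 0

-- A's inner loop is an 'all' over its index list
theorem isSameGo_all (l : List Int) (is : List Int) :
    isSameGo l is =
      is.all (fun i => PySem.List.pyGetD l (i + 1) 0 == PySem.List.pyGetD l i 0) := by
  induction is with
  | nil => rfl
  | cons i rest ih =>
      simp only [isSameGo, List.all_cons, ih]
      by_cases h : PySem.List.pyGetD l (i + 1) 0 = PySem.List.pyGetD l i 0 <;> simp [h]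

-- B's loop: an all-check over its index list, then the fall-through value
theorem altGo_eq (l : List Int) (diff : Int) (is : List Int) :
    altGo l diff is =
      if is.all (fun i => PySem.List.pyGetD l (i + 1) 0 - PySem.List.pyGetD l i 0 == diff)
      then some (PySem.List.pyGetD l (-1) 0 + diff) else none := by
  induction is with
  | nil => rfl
  | cons i rest ih =>
      simp only [altGo, List.all_cons, ih]
      by_cases h : PySem.List.pyGetD l (i + 1) 0 - PySem.List.pyGetD l i 0 = diff <;> simp [h]

-- temp_list is the map of adjacent differences over the index range
theorem tempListA_eq_map (l : List Int) :
    tempListA l = (PySem.List.pyRange 0 ((l.length : Int) - 1) 1).map (gfun l) := by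
  simpa [tempListA, gfun] using
    PySem.List.foldl_append_singleton_eq_map
      (fun i => PySem.List.pyGetD l (i + 1) 0 - PySem.List.pyGetD l i 0)
      (PySem.List.pyRange 0 ((l.length : Int) - 1) 1)

-- a chain of adjacent equalities propagates to equality with the first element
theorem chain_to_const (g : Int → Int) (m : Int)
    (H : ∀ i : Int, 0 ≤ i → i < m - 1 → g (i + 1) = g i) :
    ∀ k : Nat, (k : Int) < m → g k = g 0 := by
  intro k
  induction k with
  | zero => intro _; norm_num
  | succ k ih =>
      intro hk
      have hk' : (k : Int) < m - 1 := by push_cast at hk; omega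
      have h1 : g ((k : Int) + 1) = g k := H k (by positivity) hk'
      have h2 : g (k : Int) = g 0 := ih (by omega)
      push_cast
      rw [h1, h2]

theorem chain_iff_const (g : Int → Int) (m : Int) :
    (∀ i : Int, 0 ≤ i → i < m - 1 → g (i + 1) = g i) ↔
    (∀ i : Int, 1 ≤ i → i < m → g i = g 0) := by
  constructor
  · intro H i h1 h2
    have h0 : 0 ≤ i := by omega
    have := chain_to_const g m H i.toNat (by rw [Int.toNat_of_nonneg h0]; exact h2)
    rwa [Int.toNat_of_nonneg h0] at this
  · intro H i h0 h1
    have ha : g (i + 1) = g 0 := H (i + 1) (by omega) (by omega)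
    by_cases hi : i = 0
    · rw [hi] at ha ⊢; simpa using ha
    · have hb : g i = g 0 := H i (by omega) (by omega)
      rw [ha, hb]

theorem main_eq (l : List Int) (hpre : 2 ≤ l.length) :
    is_ariphmetic l = is_ariphmetic_alt l := by
  have hn : (2 : Int) ≤ (l.length : Int) := by exact_mod_cast hpre
  have hne : l ≠ [] := by intro h; rw [h] at hpre; simp at hpre
  have ht : tempListA l = (PySem.List.pyRange 0 ((l.length : Int) - 1) 1).map (gfun l) :=
    tempListA_eq_map l
  have htlen : (((tempListA l).length : Int)) = (l.length : Int) - 1 := by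
    rw [ht, List.length_map, PySem.List.length_pyRange_one]; omega
  have hget_t : ∀ i : Int, 0 ≤ i → i < (l.length : Int) - 1 →
      PySem.List.pyGetD (tempListA l) i 0 = gfun l i := by
    intro i h0 h1
    rw [ht]
    exact PySem.List.pyGetD_map_pyRange_of_nonneg (gfun l) ((l.length : Int) - 1) i 0 h0 h1
  -- condition of A
  have hAcond : (is_same (tempListA l) = true) ↔
      (∀ i : Int, 0 ≤ i → i < ((l.length : Int) - 1) - 1 → gfun l (i + 1) = gfun l i) := by
    rw [is_same, isSameGo_all, List.all_eq_true]
    constructor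
    · intro h i h0 h1
      have hmem : i ∈ PySem.List.pyRange 0 (((tempListA l).length : Int) - 1) 1 :=
        PySem.List.mem_pyRange_one.mpr ⟨h0, by rw [htlen]; omega⟩
      have := h i hmem
      rw [beq_iff_eq] at this
      rwa [hget_t (i + 1) (by omega) (by omega), hget_t i h0 (by omega)] at this
    · intro h i hmem
      rw [PySem.List.mem_pyRange_one] at hmem
      obtain ⟨h0, h1⟩ := hmem
      rw [htlen] at h1
      rw [beq_iff_eq, hget_t (i + 1) (by omega) (by omega), hget_t i h0 (by omega)]
      exact h i h0 (by omega)
  -- the values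
  have hlastA : PySem.List.pyGet? l ((l.length : Int) - 1) = some (l.getD (l.length - 1) 0) := by
    have hcast : (l.length : Int) - 1 = ((l.length - 1 : Nat) : Int) := by omega
    rw [hcast, PySem.List.pyGet?_natCast, List.getElem?_eq_getElem (by omega),
        List.getD_eq_getElem _ _ (by omega)]
  have ht0 : PySem.List.pyGet? (tempListA l) 0 = some (gfun l 0) := by
    have hlen0 : 0 < (tempListA l).length := by omega
    have h0' : PySem.List.pyGetD (tempListA l) 0 0 = gfun l 0 := hget_t 0 le_rfl (by omega)
    rw [PySem.List.pyGetD_zero, List.getD_eq_getElem _ _ hlen0] at h0'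
    rw [PySem.List.pyGet?_zero, List.getElem?_eq_getElem hlen0, h0']
  have hget1 : PySem.List.pyGet? l 1 = some (PySem.List.pyGetD l 1 0) := by
    rw [PySem.List.pyGet?_eq_some_getElem l (by omega) (by omega),
        PySem.List.pyGetD_eq_getElem l 0 (by omega) (by omega)]
  have hget0 : PySem.List.pyGet? l 0 = some (PySem.List.pyGetD l 0 0) := by
    rw [PySem.List.pyGet?_eq_some_getElem l (by omega) (by omega),
        PySem.List.pyGetD_eq_getElem l 0 (by omega) (by omega)]
  have hg0 : PySem.List.pyGetD l 1 0 - PySem.List.pyGetD l 0 0 = gfun l 0 := by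
    simp only [gfun]
    norm_num
  have hlastB : PySem.List.pyGetD l (-1) 0 = l.getD (l.length - 1) 0 := by
    rw [PySem.List.pyGetD_neg_one l 0 hne, List.getLast_eq_getElem,
        List.getD_eq_getElem _ _ (by omega)]
  -- condition of B
  have hBcond : ((PySem.List.pyRange 1 ((l.length : Int) - 1) 1).all
      (fun i => PySem.List.pyGetD l (i + 1) 0 - PySem.List.pyGetD l i 0 == gfun l 0) = true) ↔
      (∀ i : Int, 1 ≤ i → i < (l.length : Int) - 1 → gfun l i = gfun l 0) := by
    rw [List.all_eq_true]
    constructor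
    · intro h i h1 h2
      have := h i (PySem.List.mem_pyRange_one.mpr ⟨h1, h2⟩)
      rwa [beq_iff_eq] at this
    · intro h i hmem
      rw [PySem.List.mem_pyRange_one] at hmem
      rw [beq_iff_eq]
      exact h i hmem.1 hmem.2
  -- assemble
  unfold is_ariphmetic is_ariphmetic_alt
  simp only [hlastA, ht0, hget1, hget0]
  rw [altGo_eq, hg0]
  by_cases hc : (∀ i : Int, 1 ≤ i → i < (l.length : Int) - 1 → gfun l i = gfun l 0)
  · rw [if_pos (hAcond.mpr ((chain_iff_const (gfun l) ((l.length : Int) - 1)).mpr hc)),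
        if_pos (hBcond.mpr hc), hlastB]
  · rw [if_neg (fun h => hc (hBcond.mp h)),
        if_neg (fun h => hc ((chain_iff_const (gfun l) ((l.length : Int) - 1)).mp (hAcond.mp h)))]

-- ===== VERDICT (by name: the statement is the Claim_ definition above) =====
theorem is_ariphmetic_spec : Claim_equal_is_ariphmetic := by
  intro number_list _ hpre
  unfold Spec_is_ariphmetic
  exact main_eq number_list hpre
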